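-- pv_equiv track=rewrite | github.com/Cashfire/leetcodePython | apartment-hunting.py | get_req_dist
-- ===== SOURCE A (Python) =====
-- def get_req_dist(blocks, req):
--     min_idx = float('inf')
--     n = len(blocks)
--     dists = [n for i in range(n)]
--     for i in range(n):
--         if blocks[i][req]:
--             min_idx = i
--         dists[i] = abs(i - min_idx)
--     for i in reversed(range(n)):
--         if blocks[i][req]:
--             min_idx = i
--         dists[i] = min(dists[i], abs(i - min_idx))
--     return dists
-- ===== SOURCE B (Python) =====
-- def get_req_dist(blocks, req):
--     idxs = [i for i, blk in enumerate(blocks) if blk[req]]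
--     if not idxs:
--         return [float('inf')] * len(blocks)
--     return [min(abs(i - t) for t in idxs) for i in range(len(blocks))]
-- ===== Notes on version B (the rewrite author's own statement) =====
-- stated objective: simpler
-- what changed: B replaces A's two directional sweeps with a rolling nearest-index state by a single list of requirement-carrying positions and, per apartment, a direct minimum of absolute distances to those positions.
-- outside the precondition, e.g. on get_req_dist([{'gym': False}], 'gym'): A returns [inf], B returns [inf]; on get_req_dist([{'pool': True}], 'gym'): A raises KeyError, B raises KeyError
import Mathlib
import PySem

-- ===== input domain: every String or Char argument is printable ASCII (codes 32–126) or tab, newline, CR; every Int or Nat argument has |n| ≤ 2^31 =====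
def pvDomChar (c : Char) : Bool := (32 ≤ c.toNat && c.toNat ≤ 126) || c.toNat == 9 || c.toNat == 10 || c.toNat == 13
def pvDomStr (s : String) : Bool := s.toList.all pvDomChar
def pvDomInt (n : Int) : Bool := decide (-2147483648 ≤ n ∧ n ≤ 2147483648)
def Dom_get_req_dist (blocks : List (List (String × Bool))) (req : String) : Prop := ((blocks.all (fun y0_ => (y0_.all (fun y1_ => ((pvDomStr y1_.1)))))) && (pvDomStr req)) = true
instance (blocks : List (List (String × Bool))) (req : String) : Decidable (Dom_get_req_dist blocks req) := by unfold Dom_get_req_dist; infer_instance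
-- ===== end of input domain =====

-- B computes each apartment's answer as a direct minimum of distances to the list of
-- requirement-carrying positions, instead of A's two directional sweeps (objective: simpler).

-- ===== PORT A =====
-- A's min_idx starts at float('inf'); we represent that state as Option Int (none = inf),
-- and Python's min(dists[i], abs(i - min_idx)) over such values is `omin` (none behaves as +inf).
def omin : Option Int → Option Int → Option Int
  | none, y => y
  | some a, none => some a
  | some a, some b => some (min a b)

-- first loop: walk left-to-right carrying min_idx; returns the dists list and the final min_idx
def pass1 : List Bool → Int → Option Int → List (Option Int) × Option Int
  | [], _, m => ([], m)
  | b :: r, i, m =>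
      let m' := if b then some i else m
      let rec_ := pass1 r (i + 1) m'
      ((m'.map (fun mm => |i - mm|)) :: rec_.1, rec_.2)

-- second loop: reversed(range(n)) = recursion that processes the tail (larger indices) first,
-- carrying min_idx right-to-left; the third argument is min_idx entering from the right end.
def pass2 : List (Bool × Option Int) → Int → Option Int → List (Option Int) × Option Int
  | [], _, m => ([], m)
  | (b, d) :: r, i, m =>
      let rec_ := pass2 r (i + 1) m
      let m'' := if b then some i else rec_.2
      (omin d (m''.map (fun mm => |i - mm|)) :: rec_.1, m'')

-- blocks[i][req] is a dict lookup (KeyError = none, excluded by Pre_; getD false only fires outside Pre_).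
-- The final .getD 0 only fires outside Pre_ (when an entry is still inf, i.e. no requirement anywhere).
def get_req_dist (blocks : List (List (String × Bool))) (req : String) : List Int :=
  let bs := blocks.map (fun blk => ((PySem.Dict.mk blk).get? req).getD false)
  let p1 := pass1 bs 0 none
  ((pass2 (bs.zip p1.1) 0 p1.2).1).map (fun o => o.getD 0)

-- ===== PORT B =====
-- The `if idxs = []` branch is Python B's `[float('inf')] * n`: inside Pre_ it is reached only
-- for blocks = [], where it is []; the .getD 0 never fires (idxs is nonempty there).
def get_req_dist_alt (blocks : List (List (String × Bool))) (req : String) : List Int :=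
  let bs := blocks.map (fun blk => ((PySem.Dict.mk blk).get? req).getD false)
  let idxs := (PySem.List.enumerate bs 0).filterMap (fun p => if p.2 then some p.1 else none)
  if idxs = [] then []
  else (PySem.List.pyRange 0 (PySem.List.len bs) 1).map
        (fun i => (PySem.List.min? (idxs.map (fun t => |i - t|)) (fun x => x)).getD 0)

-- ===== PRECONDITION & SPEC =====
-- Pre_ excludes (a) blocks missing the key req, where A raises KeyError, and (b) nonempty inputs
-- in which no block carries req, where A returns a list of float('inf') — not values of type Int.
def Pre_get_req_dist (blocks : List (List (String × Bool))) (req : String) : Prop :=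
  (∀ blk ∈ blocks, ((PySem.Dict.mk blk).get? req).isSome = true) ∧
  (blocks = [] ∨ ∃ blk ∈ blocks, ((PySem.Dict.mk blk).get? req).getD false = true)
instance (blocks : List (List (String × Bool))) (req : String) : Decidable (Pre_get_req_dist blocks req) := by
  unfold Pre_get_req_dist; infer_instance

def pvWitness_get_req_dist : (List (List (String × Bool))) × String :=
  ([[("gym", false)], [("gym", true)], [("gym", false)]], "gym")

def Spec_get_req_dist (blocks : List (List (String × Bool))) (req : String) (out : List Int) : Prop := out = get_req_dist_alt blocks req
instance (blocks : List (List (String × Bool))) (req : String) (out : List Int) : Decidable (Spec_get_req_dist blocks req out) := by unfold Spec_get_req_dist; infer_instance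

-- ===== CLAIM (what is proved, stated in full; the proofs are below) =====
def Claim_equal_get_req_dist : Prop := ∀ (blocks : List (List (String × Bool))) (req : String), Dom_get_req_dist blocks req → Pre_get_req_dist blocks req → Spec_get_req_dist blocks req (get_req_dist blocks req)

-- ===== LEMMAS AND PROOFS =====

-- the (absolute) positions of `true` in bs, the segment starting at index i0
def S : List Bool → Int → List Int
  | [], _ => []
  | b :: r, i => if b then i :: S r (i + 1) else S r (i + 1)

-- minimum distance from p to a point of C (none = C empty); its body is exactly what
-- PySem.List.min? of the mapped distances computes (see min?_eq_mD)
def mD : List Int → Int → Option Int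
  | [], _ => none
  | c :: r, p => some ((r.map (fun t => |p - t|)).foldl min (|p - c|))

-- the claimed common value of both programs: positions i0, i0+1, … (n entries), each mapped to mD C
def tgt (C : List Int) : Int → Nat → List (Option Int)
  | _, 0 => []
  | i0, n + 1 => mD C i0 :: tgt C (i0 + 1) n

theorem omin_assoc (a b c : Option Int) : omin (omin a b) c = omin a (omin b c) := by
  cases a <;> cases b <;> cases c <;> simp [omin, min_assoc]

theorem mD_cons (c : Int) (C : List Int) (p : Int) :
    mD (c :: C) p = omin (some (|p - c|)) (mD C p) := by
  cases C with
  | nil => simp [mD, omin]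
  | cons c' r =>
      simp only [mD, omin, List.map_cons, List.foldl_cons]
      rw [List.foldl_assoc]

theorem mD_nonneg (C : List Int) (p v : Int) (h : mD C p = some v) : 0 ≤ v := by
  induction C generalizing v with
  | nil => simp [mD] at h
  | cons c r ih =>
      rw [mD_cons] at h
      cases hr : mD r p with
      | none => rw [hr] at h; simp [omin] at h; exact h ▸ abs_nonneg _
      | some w =>
          rw [hr] at h; simp [omin] at h
          exact h ▸ le_min (abs_nonneg _) (ih w hr)

theorem mD_mem_zero (C : List Int) (p : Int) (h : p ∈ C) : mD C p = some 0 := by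
  induction C with
  | nil => simp at h
  | cons c r ih =>
      rw [mD_cons]
      rcases List.mem_cons.mp h with h1 | h2
      · subst h1
        cases hr : mD r p with
        | none => simp [omin]
        | some w =>
            have hw := mD_nonneg r p w hr
            simp [omin]
            exact hw
      · rw [ih h2]
        simp [omin]

theorem mD_cons_le (c : Int) (C : List Int) (p : Int) :
    ∃ v, mD (c :: C) p = some v ∧ v ≤ |p - c| := by
  rw [mD_cons]
  cases hr : mD C p with
  | none => exact ⟨_, rfl, le_refl _⟩
  | some w => exact ⟨_, rfl, min_le_left _ _⟩

theorem mD_append (C D : List Int) (p : Int) :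
    mD (C ++ D) p = omin (mD C p) (mD D p) := by
  induction C with
  | nil =>
      rw [List.nil_append]
      cases hD : mD D p <;> simp [mD, omin]
  | cons c r ih =>
      rw [List.cons_append, mD_cons, mD_cons, ih, omin_assoc]

theorem S_ge (bs : List Bool) (i0 : Int) : ∀ t ∈ S bs i0, i0 ≤ t := by
  induction bs generalizing i0 with
  | nil => simp [S]
  | cons b r ih =>
      intro t ht
      by_cases hb : b
      · simp [S, hb] at ht
        rcases ht with h | h
        · omega
        · have := ih (i0 + 1) t h; omega
      · simp [S, hb] at ht
        have := ih (i0 + 1) t ht; omega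

theorem mD_S_right (bs : List Bool) (i0 p : Int) (hp : p ≤ i0) :
    mD (S bs i0) p = (S bs i0).head?.map (fun t => t - p) := by
  induction bs generalizing i0 with
  | nil => simp [S, mD]
  | cons b r ih =>
      by_cases hb : b
      · simp only [S, if_pos hb]
        rw [mD_cons, ih (i0 + 1) (by omega)]
        have h1 : |p - i0| = i0 - p := by
          have := abs_of_nonpos (show p - i0 ≤ 0 by omega); omega
        cases hh : (S r (i0 + 1)).head? with
        | none => simp [omin, h1]
        | some t =>
            have ht : t ∈ S r (i0 + 1) := List.mem_of_mem_head? hh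
            have := S_ge r (i0 + 1) t ht
            simp [omin, h1]
            omega
      · simp only [S, if_neg hb]
        exact ih (i0 + 1) (by omega)

theorem tgt_congr (C C' : List Int) (n : Nat) (i0 : Int)
    (h : ∀ p, i0 ≤ p → mD C p = mD C' p) : tgt C i0 n = tgt C' i0 n := by
  induction n generalizing i0 with
  | zero => rfl
  | succ n ih =>
      simp only [tgt]
      refine congrArg₂ _ (h i0 (le_refl _)) (ih (i0 + 1) ?_)
      intro p hp; exact h p (by omega)

theorem mD_drop_left (mm i0 : Int) (T : List Int) (p : Int) (hm : mm ≤ i0) (hp : i0 ≤ p) :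
    mD (mm :: i0 :: T) p = mD (i0 :: T) p := by
  obtain ⟨v, hv, hle⟩ := mD_cons_le i0 T p
  rw [mD_cons, hv]
  have h1 : |p - i0| = p - i0 := abs_of_nonneg (by omega)
  have h2 : |p - mm| = p - mm := abs_of_nonneg (by omega)
  simp [omin]
  omega

-- the main invariant: running A's two passes over a segment starting at i0, with pass1's
-- incoming state m (an index < i0 or none), yields mD of (m's point plus the segment's true
-- positions) at every position, and pass2 hands back the first true position (else m).
theorem main_inv (bs : List Bool) (i0 : Int) (m : Option Int)
    (hm : ∀ mm ∈ m, mm < i0) :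
    pass2 (bs.zip (pass1 bs i0 m).1) i0 (pass1 bs i0 m).2
      = (tgt (m.toList ++ S bs i0) i0 bs.length, (S bs i0).head?.or m) := by
  induction bs generalizing i0 m with
  | nil => simp [pass1, pass2, S, tgt, Option.or]
  | cons b r ih =>
      have hm' : ∀ mm ∈ (if b then some i0 else m), mm < i0 + 1 := by
        intro mm hmm
        by_cases hb : b
        · simp [hb] at hmm; omega
        · simp [hb] at hmm; have := hm mm (by simp [hmm]); omega
      have IH := ih (i0 + 1) (if b then some i0 else m) hm'
      simp only [pass1, List.zip_cons_cons, pass2, IH]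
      by_cases hb : b
      · rw [if_pos hb] at *
        simp only [S, if_pos hb, List.length_cons, tgt, Prod.mk.injEq, List.cons.injEq]
        refine ⟨⟨?_, ?_⟩, ?_⟩
        · rw [mD_mem_zero _ _ (show i0 ∈ m.toList ++ i0 :: S r (i0 + 1) by simp)]
          simp [omin]
        · cases m with
          | none => simp
          | some mm =>
              have hmm : mm ≤ i0 := by have := hm mm rfl; omega
              have hdrop : tgt (mm :: i0 :: S r (i0 + 1)) (i0 + 1) r.length
                  = tgt (i0 :: S r (i0 + 1)) (i0 + 1) r.length :=
                tgt_congr _ _ _ _ (fun p hp => mD_drop_left mm i0 _ p hmm (by omega))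
              simpa using hdrop.symm
        · simp [Option.or]
      · rw [if_neg hb] at *
        simp only [S, if_neg hb, List.length_cons, tgt, Prod.mk.injEq, List.cons.injEq]
        refine ⟨⟨?_, trivial⟩, trivial⟩
        rw [mD_append]
        have hmd : mD m.toList i0 = m.map (fun mm => |i0 - mm|) := by
          cases m <;> simp [mD]
        rw [hmd, mD_S_right r (i0 + 1) i0 (by omega)]
        cases hh : (S r (i0 + 1)).head? with
        | none => cases m <;> simp [omin, Option.or]
        | some t =>
            have ht : t ∈ S r (i0 + 1) := List.mem_of_mem_head? hh
            have hti : i0 + 1 ≤ t := S_ge r (i0 + 1) t ht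
            have h2 : |i0 - t| = t - i0 := by
              have := abs_of_nonpos (show i0 - t ≤ 0 by omega); omega
            cases m <;> simp [omin, Option.or, h2]

theorem S_filterMap (bs : List Bool) (i0 : Int) :
    (PySem.List.enumerate bs i0).filterMap (fun p => if p.2 then some p.1 else none)
      = S bs i0 := by
  induction bs generalizing i0 with
  | nil => simp [PySem.List.enumerate_nil, S]
  | cons b r ih =>
      rw [PySem.List.enumerate_cons]
      by_cases hb : b <;> simp [S, hb, ih]

theorem S_ne_nil (bs : List Bool) (i0 : Int) (h : true ∈ bs) : S bs i0 ≠ [] := by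
  induction bs generalizing i0 with
  | nil => simp at h
  | cons b r ih =>
      by_cases hb : b
      · simp [S, hb]
      · simp [hb] at h
        simp [S, hb]
        exact ih (i0 + 1) h

theorem min?_eq_mD (C : List Int) (p : Int) :
    PySem.List.min? (C.map (fun t => |p - t|)) (fun x => x) = mD C p := by
  cases C with
  | nil => simp [PySem.List.min?, mD]
  | cons c r => rw [List.map_cons, PySem.List.min?_id_cons]; rfl

theorem pyRange_tgt (C : List Int) (n : Nat) (i0 : Int) :
    (PySem.List.pyRange i0 (i0 + (n : Int)) 1).map (fun i => (mD C i).getD 0)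
      = (tgt C i0 n).map (fun o => o.getD 0) := by
  induction n generalizing i0 with
  | zero => simp [PySem.List.pyRange_one_eq_nil, tgt]
  | succ n ih =>
      push_cast
      rw [PySem.List.pyRange_one_cons (by omega : i0 < i0 + ((n : Int) + 1))]
      simp only [tgt, List.map_cons]
      have : i0 + ((n : Int) + 1) = (i0 + 1) + (n : Int) := by omega
      rw [this, ih (i0 + 1)]

-- ===== VERDICT (by name: the statement is the Claim_ definition above) =====
theorem get_req_dist_spec : Claim_equal_get_req_dist := by
  intro blocks req _hdom hpre
  unfold Spec_get_req_dist get_req_dist get_req_dist_alt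
  dsimp only
  rcases hpre.2 with hnil | ⟨blk, hblk, htrue⟩
  · subst hnil
    rfl
  · have htb : true ∈ blocks.map (fun blk => ((PySem.Dict.mk blk).get? req).getD false) :=
      List.mem_map.mpr ⟨blk, hblk, htrue⟩
    generalize hbs : blocks.map (fun blk => ((PySem.Dict.mk blk).get? req).getD false) = bs at htb ⊢
    have hS : S bs 0 ≠ [] := S_ne_nil bs 0 htb
    rw [S_filterMap, if_neg hS]
    rw [main_inv bs 0 none (by simp)]
    simp only [Option.toList_none, List.nil_append]
    rw [PySem.List.len_eq]
    have hpt := pyRange_tgt (S bs 0) bs.length 0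
    rw [(by omega : (0:Int) + (bs.length : Int) = (bs.length : Int))] at hpt
    rw [← hpt]
    apply List.map_congr_left
    intro i _
    rw [min?_eq_mD]
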